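-- pv_equiv track=rewrite | github.com/zyongye/vllm | vllm/model_executor/layers/quantization/turboquant/config.py | get_boundary_skip_layers
-- ===== SOURCE A (Python) =====
-- def get_boundary_skip_layers(num_layers: int, n: int = 2) -> list[str]:
--     """Get layer indices to skip TQ compression (boundary protection).
--
--     Returns first N and last N layer indices as strings, suitable for
--     kv_cache_dtype_skip_layers.
--     """
--     if n <= 0 or num_layers <= 0:
--         return []
--     n = min(n, num_layers // 2)  # don't skip more than half
--     first = list(range(n))
--     last = list(range(num_layers - n, num_layers))
--     # Deduplicate (if num_layers <= 2*n)
--     indices = sorted(set(first + last))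
--     return [str(i) for i in indices]
-- ===== SOURCE B (Python) =====
-- def get_boundary_skip_layers(num_layers: int, n: int = 2) -> list[str]:
--     """Get layer indices to skip TQ compression (boundary protection)."""
--     if n <= 0 or num_layers <= 0:
--         return []
--     m = min(n, num_layers // 2)
--     # One pass: position k of the output is layer k for k < m,
--     # and layer num_layers - 2*m + k for the tail half.
--     return [str(k if k < m else num_layers - 2 * m + k) for k in range(2 * m)]
-- ===== Notes on version B (the rewrite author's own statement) =====
-- stated objective: alternative
-- what changed: Replaces A's two separate ranges merged through a set and sort by a single pass over range(2*m) with a piecewise output-position-to-layer-index formula (k for the head half, num_layers-2*m+k for the tail half), so no intermediate lists, no set and no sort are built.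
import Mathlib
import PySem

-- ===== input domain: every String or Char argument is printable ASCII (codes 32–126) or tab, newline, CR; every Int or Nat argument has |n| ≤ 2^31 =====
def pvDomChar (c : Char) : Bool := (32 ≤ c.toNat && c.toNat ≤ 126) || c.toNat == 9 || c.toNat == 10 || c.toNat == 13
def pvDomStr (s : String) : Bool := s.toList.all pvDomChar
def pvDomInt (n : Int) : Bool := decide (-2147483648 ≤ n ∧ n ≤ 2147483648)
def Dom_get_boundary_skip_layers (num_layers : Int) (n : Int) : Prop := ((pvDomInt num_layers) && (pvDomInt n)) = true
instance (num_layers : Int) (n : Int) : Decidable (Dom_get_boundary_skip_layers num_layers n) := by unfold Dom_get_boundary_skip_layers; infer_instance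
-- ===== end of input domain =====

-- B replaces A's two ranges + set + sort by a single pass over range(2*m) with a
-- piecewise output-position-to-layer-index formula (objective: alternative).

-- ===== PORT A =====
def get_boundary_skip_layers (num_layers : Int) (n : Int) : List String :=
  if n ≤ 0 ∨ num_layers ≤ 0 then []
  else
    let n' := min n (PySem.Int.floordiv num_layers 2)
    let first := PySem.List.pyRange 0 n' 1
    let last := PySem.List.pyRange (num_layers - n') num_layers 1
    let indices := PySem.List.sorted (PySem.Set.ofList (first ++ last)) (fun x => x) false
    indices.map PySem.Int.toStr

-- ===== PORT B =====
def get_boundary_skip_layers_alt (num_layers : Int) (n : Int) : List String :=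
  if n ≤ 0 ∨ num_layers ≤ 0 then []
  else
    let n' := min n (PySem.Int.floordiv num_layers 2)
    (PySem.List.pyRange 0 (2 * n') 1).map
      (fun k => PySem.Int.toStr (if k < n' then k else num_layers - 2 * n' + k))

-- ===== PRECONDITION & SPEC =====
def Spec_get_boundary_skip_layers (num_layers : Int) (n : Int) (out : List String) : Prop := out = get_boundary_skip_layers_alt num_layers n
instance (num_layers : Int) (n : Int) (out : List String) : Decidable (Spec_get_boundary_skip_layers num_layers n out) := by unfold Spec_get_boundary_skip_layers; infer_instance

-- ===== CLAIM =====
def Claim_equal_get_boundary_skip_layers : Prop := ∀ (num_layers : Int) (n : Int), Dom_get_boundary_skip_layers num_layers n → Spec_get_boundary_skip_layers num_layers n (get_boundary_skip_layers num_layers n)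

-- ===== LEMMAS AND PROOFS =====

-- A side: with 0 ≤ n' ≤ nl - n' the concatenation of the two ranges is already
-- nodup and sorted, so the set + sort is the identity.
theorem a_core (nl n' : Int) (h1 : n' ≤ nl - n') :
    PySem.List.sorted (PySem.Set.ofList
        (PySem.List.pyRange 0 n' 1 ++ PySem.List.pyRange (nl - n') nl 1)) (fun x => x) false
    = PySem.List.pyRange 0 n' 1 ++ PySem.List.pyRange (nl - n') nl 1 := by
  have hcat : (PySem.List.pyRange 0 n' 1 ++ PySem.List.pyRange (nl - n') nl 1).Pairwise (· < ·) := by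
    refine List.pairwise_append.mpr ⟨PySem.List.pairwise_lt_pyRange_one _ _,
      PySem.List.pairwise_lt_pyRange_one _ _, ?_⟩
    intro a ha b hb
    rw [PySem.List.mem_pyRange_one] at ha hb
    omega
  have hnodup : (PySem.List.pyRange 0 n' 1 ++ PySem.List.pyRange (nl - n') nl 1).Nodup :=
    hcat.imp (fun h => ne_of_lt h)
  rw [PySem.Set.ofList_eq_self_of_nodup _ hnodup,
    PySem.List.sorted_eq_self_of_pairwise _ _ (hcat.imp (fun h => le_of_lt h))]

-- B side: splitting range(2*m) at m, the head half maps to itself and the tail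
-- half shifts onto the last block.
theorem b_core (nl n' : Int) (h0 : 0 ≤ n') :
    (PySem.List.pyRange 0 (2 * n') 1).map
        (fun k => if k < n' then k else nl - 2 * n' + k)
    = PySem.List.pyRange 0 n' 1 ++ PySem.List.pyRange (nl - n') nl 1 := by
  rw [PySem.List.pyRange_one_append 0 n' (2 * n') h0 (by omega), List.map_append]
  congr 1
  · have : ∀ k ∈ PySem.List.pyRange 0 n' 1,
        (if k < n' then k else nl - 2 * n' + k) = k := by
      intro k hk
      rw [PySem.List.mem_pyRange_one] at hk
      simp [hk.2]
    rw [List.map_congr_left this]; exact List.map_id _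
  · rw [PySem.List.pyRange_one n' (2 * n'), PySem.List.pyRange_one (nl - n') nl]
    have hlen : (nl - (nl - n')).toNat = (2 * n' - n').toNat := by omega
    rw [hlen, List.map_map]
    apply List.map_congr_left
    intro k hk
    rw [List.mem_range] at hk
    have : ¬ (n' + (k : Int) < n') := by omega
    simp only [Function.comp, this, if_false]
    omega

-- ===== VERDICT =====
theorem get_boundary_skip_layers_spec : Claim_equal_get_boundary_skip_layers := by
  intro nl n _
  unfold Spec_get_boundary_skip_layers get_boundary_skip_layers get_boundary_skip_layers_alt
  by_cases hg : n ≤ 0 ∨ nl ≤ 0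
  · simp [hg]
  · simp only [hg, if_false]
    push Not at hg
    obtain ⟨hn, hnl⟩ := hg
    set n' := min n (PySem.Int.floordiv nl 2) with hn'
    have hfd : PySem.Int.floordiv nl 2 = nl / 2 := by
      simp [PySem.Int.floordiv]
      exact Int.fdiv_eq_ediv_of_nonneg _ (by omega)
    have h0 : 0 ≤ n' := by rw [hn', hfd]; omega
    have h1 : n' ≤ nl - n' := by
      have hle : n' ≤ nl / 2 := by rw [hn', hfd]; exact min_le_right _ _
      omega
    rw [a_core nl n' h1]
    have : (fun k => PySem.Int.toStr (if k < n' then k else nl - 2 * n' + k))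
        = PySem.Int.toStr ∘ (fun k => if k < n' then k else nl - 2 * n' + k) := rfl
    rw [this, ← List.map_map, b_core nl n' h0]
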